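-- pv_equiv track=rewrite | github.com/xndong/w3resourcePythonExercise | String/String-exercise4.py | string_operation_4
-- ===== SOURCE A (Python) =====
-- def string_operation_4(astring):
--     target=astring[0]
--     result=""
--     for char in astring:
--         if char==target:
--             result+='$'
--         else:
--             result+=char
--     return target+result[1:]
-- ===== SOURCE B (Python) =====
-- def string_operation_4(astring):
--     head = astring[0]
--     return head + '$'.join(astring[1:].split(head))
-- ===== Notes on version B (the rewrite author's own statement) =====
-- stated objective: faster
-- what changed: Replaces the character-by-character accumulator loop (quadratic repeated string concatenation) with a single split on the head character joined back with the replacement separator.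
import Mathlib
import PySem

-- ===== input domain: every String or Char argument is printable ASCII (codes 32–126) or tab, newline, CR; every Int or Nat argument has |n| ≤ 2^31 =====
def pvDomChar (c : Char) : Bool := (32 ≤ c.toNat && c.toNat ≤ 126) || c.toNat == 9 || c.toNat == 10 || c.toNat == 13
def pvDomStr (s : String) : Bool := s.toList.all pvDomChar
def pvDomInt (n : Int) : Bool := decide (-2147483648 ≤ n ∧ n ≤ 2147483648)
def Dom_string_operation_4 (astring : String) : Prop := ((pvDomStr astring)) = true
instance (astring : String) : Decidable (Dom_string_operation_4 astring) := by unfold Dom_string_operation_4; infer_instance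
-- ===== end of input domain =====

-- B replaces A's char-by-char accumulator loop with a split-on-head / join decomposition over the tail (measured faster; same values).
-- ===== PORT A =====
def string_operation_4 (astring : String) : String :=
  match PySem.Str.pyGet? astring 0 with
  | none => ""   -- unreachable under Pre_ (Python raises IndexError on "")
  | some target =>
    let result : List Char :=
      astring.toList.foldl (fun acc c => if c = target then acc ++ ['$'] else acc ++ [c]) []
    String.ofList ([target] ++ PySem.List.slice result (some 1) none)

-- ===== PORT B =====
def string_operation_4_alt (astring : String) : String :=
  match PySem.Str.pyGet? astring 0 with
  | none => ""   -- unreachable under Pre_ (Python raises IndexError on "")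
  | some head =>
    let tail : List Char := PySem.List.slice astring.toList (some 1) none
    String.ofList ([head] ++ PySem.Chars.join ['$'] (PySem.Chars.splitOn tail [head]))

-- ===== PRECONDITION & SPEC =====
-- Pre_ excludes only the empty string, on which Python A raises IndexError (astring[0]).
def Pre_string_operation_4 (astring : String) : Prop := astring ≠ ""
instance (astring : String) : Decidable (Pre_string_operation_4 astring) := by unfold Pre_string_operation_4; infer_instance
def pvWitness_string_operation_4 : String := "hello"
def Spec_string_operation_4 (astring : String) (out : String) : Prop := out = string_operation_4_alt astring
instance (astring : String) (out : String) : Decidable (Spec_string_operation_4 astring out) := by unfold Spec_string_operation_4; infer_instance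

-- ===== CLAIM (what is proved, stated in full; the proofs are below) =====
def Claim_equal_string_operation_4 : Prop := ∀ (astring : String), Dom_string_operation_4 astring → Pre_string_operation_4 astring → Spec_string_operation_4 astring (string_operation_4 astring)

-- ===== LEMMAS AND PROOFS =====

-- structural single-char split, used only to characterise PySem.Chars.splitOn in the proof
def split1 (h : Char) : List Char → List (List Char)
  | [] => [[]]
  | c :: rest => if c = h then [] :: split1 h rest else (split1 h rest).modifyHead (c :: ·)

theorem split1_ne_nil (h : Char) (l : List Char) : split1 h l ≠ [] := by
  cases l with
  | nil => simp [split1]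
  | cons c rest =>
    simp only [split1]
    split_ifs <;> simp [List.modifyHead_eq_nil_iff, split1_ne_nil h rest]

theorem go_eq (h : Char) : ∀ (fuel : Nat) (l cur : List Char) (acc : List (List Char)), l.length ≤ fuel →
    PySem.Chars.splitOn.go [h] fuel l cur acc
      = acc.reverse ++ (split1 h l).modifyHead (cur.reverse ++ ·) := by
  intro fuel
  induction fuel with
  | zero =>
    intro l cur acc hl
    have : l = [] := by cases l <;> simp_all
    subst this
    simp [PySem.Chars.splitOn.go, split1]
  | succ fuel ih =>
    intro l cur acc hl
    cases l with
    | nil => simp [PySem.Chars.splitOn.go, split1]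
    | cons c rest =>
      simp only [PySem.Chars.splitOn.go, split1]
      by_cases hc : c = h
      · subst hc
        simp only [List.isPrefixOf, BEq.rfl, Bool.true_and, if_true,
          List.length_cons, List.length_nil, List.drop_succ_cons, List.drop_zero]
        rw [ih rest [] (cur.reverse :: acc) (by simpa using hl)]
        cases split1 c rest <;> simp
      · have hpre : ([h].isPrefixOf (c :: rest)) = false := by
          simp [List.isPrefixOf]
          exact fun hh => (hc hh.symm).elim
        rw [hpre]
        simp only [Bool.false_eq_true, if_false, if_neg hc]
        rw [ih rest (c :: cur) acc (by simpa using hl)]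
        congr 1
        cases hr : split1 h rest with
        | nil => exact absurd hr (split1_ne_nil h rest)
        | cons p ps => simp

theorem splitOn_single (h : Char) (l : List Char) :
    PySem.Chars.splitOn l [h] = split1 h l := by
  rw [PySem.Chars.splitOn, go_eq h (l.length + 1) l [] [] (by omega)]
  cases split1 h l <;> simp

theorem join_split1 (h : Char) (l : List Char) :
    PySem.Chars.join ['$'] (split1 h l) = l.map (fun c => if c = h then '$' else c) := by
  induction l with
  | nil => simp [split1, PySem.Chars.join, List.intercalate]
  | cons c rest ih =>
    simp only [split1, List.map_cons]
    by_cases hc : c = h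
    · subst hc
      simp only [if_true]
      cases hr : split1 c rest with
      | nil => exact absurd hr (split1_ne_nil c rest)
      | cons p ps =>
        rw [hr] at ih
        simp only [PySem.Chars.join, List.intercalate, List.intersperse] at ih ⊢
        simp [← ih]
    · simp only [if_neg hc]
      cases hr : split1 h rest with
      | nil => exact absurd hr (split1_ne_nil h rest)
      | cons p ps =>
        rw [hr] at ih
        simp only [List.modifyHead_cons]
        simp only [PySem.Chars.join, List.intercalate] at ih ⊢
        cases ps <;> simp_all

-- ===== VERDICT (by name: the statement is the Claim_ definition above) =====
theorem string_operation_4_spec : Claim_equal_string_operation_4 := by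
  intro astring _ hpre
  unfold Spec_string_operation_4 string_operation_4 string_operation_4_alt
  have hnil : astring.toList ≠ [] := by
    simpa [String.toList_eq_nil_iff] using hpre
  obtain ⟨c, rest, hcr⟩ := List.exists_cons_of_ne_nil hnil
  have hget : PySem.Str.pyGet? astring 0 = some c := by
    simp [PySem.Str.pyGet?, PySem.List.pyGet?, PySem.List.pyIdx?, hcr]
  rw [hget]
  simp only [hcr, PySem.List.slice_from_one, List.tail_cons]
  have hfold : ∀ (l : List Char) (acc : List Char),
      l.foldl (fun acc ch => if ch = c then acc ++ ['$'] else acc ++ [ch]) acc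
        = acc ++ l.map (fun ch => if ch = c then '$' else ch) := by
    intro l acc
    rw [show (fun (acc : List Char) ch => if ch = c then acc ++ ['$'] else acc ++ [ch])
          = fun acc ch => acc ++ [if ch = c then '$' else ch] from by
        funext a ch; split_ifs <;> rfl]
    exact PySem.List.foldl_append_singleton_eq_map _ l acc
  rw [hfold, splitOn_single, join_split1]
  simp
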